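-- pv_equiv track=rewrite | github.com/WojciechLopata/Pracownia_Programowania_1 | 5.temat.arrays/zadanie_22.py | roznica
-- ===== SOURCE A (Python) =====
-- def roznica(numbers):
--
--     size=len(numbers)
--     size=size-1
--
--     mini=numbers[size]
--     maxi=numbers[size]
--     while(size>=0):
--         size=size-1
--         if(numbers[size]>maxi):maxi=numbers[size]
--         if(numbers[size]<mini):mini=numbers[size]
--     return maxi-mini
-- ===== SOURCE B (Python) =====
-- def roznica(numbers):
--     s = sorted(numbers)
--     return s[-1] - s[0]
-- ===== Notes on version B (the rewrite author's own statement) =====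
-- stated objective: simpler
-- what changed: Replaces the backwards index-tracking while loop maintaining running min/max by sorting the list once and subtracting the first element of the sorted copy from the last.
import Mathlib
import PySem

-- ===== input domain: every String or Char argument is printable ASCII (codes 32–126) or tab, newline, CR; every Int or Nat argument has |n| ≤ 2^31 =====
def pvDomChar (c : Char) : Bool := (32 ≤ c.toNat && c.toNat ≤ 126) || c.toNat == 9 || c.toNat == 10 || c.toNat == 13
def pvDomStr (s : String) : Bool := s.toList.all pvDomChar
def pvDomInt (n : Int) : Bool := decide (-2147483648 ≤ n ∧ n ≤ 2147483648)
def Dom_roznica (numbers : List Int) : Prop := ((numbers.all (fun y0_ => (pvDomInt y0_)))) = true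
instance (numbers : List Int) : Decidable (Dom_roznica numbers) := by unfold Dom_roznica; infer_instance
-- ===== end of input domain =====

-- B sorts the list and subtracts the ends instead of A's backwards while loop tracking running min/max; return values only (neither mutates its argument).

-- ===== PORT A =====
-- the while loop: fuel = size+1; at fuel k+1 the current size is k, Python decrements size
-- to k-1 and reads numbers[k-1] (k-1 = -1 wraps to the last element, exactly as in Python)
def roznicaLoop (numbers : List Int) (maxi mini : Int) : Nat → Int
  | 0 => maxi - mini
  | k+1 =>
    let x := PySem.List.pyGetD numbers ((k : Int) - 1) 0
    roznicaLoop numbers (if x > maxi then x else maxi) (if x < mini then x else mini) k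

def roznica (numbers : List Int) : Int :=
  let size : Int := (numbers.length : Int) - 1
  let mini := PySem.List.pyGetD numbers size 0
  let maxi := mini
  roznicaLoop numbers maxi mini (size + 1).toNat

-- ===== PORT B =====
def roznica_alt (numbers : List Int) : Int :=
  let s := PySem.List.sorted numbers (fun x => x) false
  PySem.List.pyGetD s (-1) 0 - PySem.List.pyGetD s 0 0

-- ===== PRECONDITION & SPEC =====
-- Pre_ excludes only the empty list, on which A raises IndexError (numbers[-1]).
def Pre_roznica (numbers : List Int) : Prop := numbers ≠ []
instance (numbers : List Int) : Decidable (Pre_roznica numbers) := by unfold Pre_roznica; infer_instance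
def pvWitness_roznica : List Int := ([3, -1, 4])

def Spec_roznica (numbers : List Int) (out : Int) : Prop := out = roznica_alt numbers
instance (numbers : List Int) (out : Int) : Decidable (Spec_roznica numbers out) := by unfold Spec_roznica; infer_instance

-- ===== CLAIM (what is proved, stated in full; the proofs are below) =====
def Claim_equal_roznica : Prop := ∀ (numbers : List Int), Dom_roznica numbers → Pre_roznica numbers → Spec_roznica numbers (roznica numbers)

-- ===== LEMMAS AND PROOFS =====

theorem if_gt_eq_max (a b : Int) : (if b > a then b else a) = max a b := by
  rcases le_total a b with h | h <;> simp [h] <;> omega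

theorem if_lt_eq_min (a b : Int) : (if b < a then b else a) = min a b := by
  rcases le_total a b with h | h <;> simp [h] <;> omega

theorem foldr_max_mem (a : Int) (l : List Int) : l.foldr max a ∈ a :: l := by
  induction l with
  | nil => simp
  | cons x t ih =>
    simp only [List.foldr_cons]
    rcases le_total x (t.foldr max a) with h | h
    · rw [max_eq_right h]; rcases List.mem_cons.mp ih with h' | h' <;> simp_all
    · rw [max_eq_left h]; simp

theorem le_foldr_max (a : Int) (l : List Int) : ∀ x ∈ a :: l, x ≤ l.foldr max a := by
  induction l with
  | nil => simp
  | cons y t ih =>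
    intro x hx
    simp only [List.foldr_cons, List.mem_cons] at hx ⊢
    rcases hx with rfl | rfl | hx
    · exact le_max_of_le_right (ih x (by simp))
    · exact le_max_left _ _
    · exact le_max_of_le_right (ih x (by simp [hx]))

theorem foldr_min_mem (a : Int) (l : List Int) : l.foldr min a ∈ a :: l := by
  induction l with
  | nil => simp
  | cons x t ih =>
    simp only [List.foldr_cons]
    rcases le_total x (t.foldr min a) with h | h
    · rw [min_eq_left h]; simp
    · rw [min_eq_right h]; rcases List.mem_cons.mp ih with h' | h' <;> simp_all

theorem foldr_min_le (a : Int) (l : List Int) : ∀ x ∈ a :: l, l.foldr min a ≤ x := by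
  induction l with
  | nil => simp
  | cons y t ih =>
    intro x hx
    simp only [List.foldr_cons, List.mem_cons] at hx ⊢
    rcases hx with rfl | rfl | hx
    · exact min_le_of_right_le (ih x (by simp))
    · exact min_le_left _ _
    · exact min_le_of_right_le (ih x (by simp [hx]))

theorem le_getLast_of_pairwise (l : List Int) (h : l ≠ []) (hp : l.Pairwise (· ≤ ·)) :
    ∀ x ∈ l, x ≤ l.getLast h := by
  induction l with
  | nil => simp at h
  | cons a t ih =>
    rcases List.pairwise_cons.mp hp with ⟨ha, hpt⟩
    rcases t with _ | ⟨b, u⟩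
    · intro x hx; simp_all
    · intro x hx
      have hne : b :: u ≠ [] := by simp
      rw [List.getLast_cons hne]
      rcases List.mem_cons.mp hx with rfl | hx
      · calc x ≤ b := ha b (by simp)
          _ ≤ (b :: u).getLast hne := ih hne hpt b (by simp)
      · exact ih hne hpt x hx

-- loop characterisation: fuel k+1 reads indices k-1, …, 0, then -1 (the last element)
theorem roznicaLoop_spec (numbers : List Int) (h : numbers ≠ []) :
    ∀ k, k ≤ numbers.length → ∀ maxi mini,
      roznicaLoop numbers maxi mini (k + 1) =
        max ((numbers.take k).foldr max maxi) (numbers.getLast h) -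
        min ((numbers.take k).foldr min mini) (numbers.getLast h) := by
  intro k
  induction k with
  | zero =>
    intro _ maxi mini
    simp only [roznicaLoop]
    have h1 : ((0 : Nat) : Int) - 1 = -1 := by norm_num
    rw [h1, PySem.List.pyGetD_neg_one (h := h)]
    simp [if_gt_eq_max, if_lt_eq_min]
  | succ k ih =>
    intro hk maxi mini
    have hk' : k < numbers.length := by omega
    rw [roznicaLoop]
    have h1 : ((k + 1 : Nat) : Int) - 1 = ((k : Nat) : Int) := by push_cast; ring
    rw [h1, PySem.List.pyGetD_natCast]
    have h2 : numbers.getD k 0 = numbers[k] := List.getD_eq_getElem numbers 0 hk'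
    rw [h2, ih (by omega), if_gt_eq_max, if_lt_eq_min]
    have h3 : numbers.take (k + 1) = numbers.take k ++ [numbers[k]] := by
      rw [List.take_succ]; simp [List.getElem?_eq_getElem hk']
    rw [h3, List.foldr_append, List.foldr_append]
    simp only [List.foldr_cons, List.foldr_nil]
    rw [max_comm (numbers[k]) maxi, min_comm (numbers[k]) mini]

theorem head_eq_getD_zero (l : List Int) (h : l ≠ []) : l.getD 0 0 = l.head h := by
  cases l with
  | nil => simp at h
  | cons a t => rfl

theorem roznica_spec : Claim_equal_roznica := by
  intro numbers _ hpre
  unfold Spec_roznica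
  set s := PySem.List.sorted numbers (fun x => x) false with hs_def
  have hperm : s.Perm numbers := PySem.List.sorted_perm numbers (fun x => x) false
  have hs : s ≠ [] := by
    intro hnil
    exact hpre ((hnil ▸ hperm).symm.eq_nil)
  have hmem : ∀ x, x ∈ s ↔ x ∈ numbers := fun x => hperm.mem_iff
  have hpair : s.Pairwise (· ≤ ·) := by
    have := PySem.List.sorted_pairwise numbers (fun x => x) (κ := Int)
    simpa [hs_def] using this
  show roznicaLoop numbers (PySem.List.pyGetD numbers ((numbers.length : Int) - 1) 0)
      (PySem.List.pyGetD numbers ((numbers.length : Int) - 1) 0)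
      (((numbers.length : Int) - 1) + 1).toNat =
    PySem.List.pyGetD s (-1) 0 - PySem.List.pyGetD s 0 0
  -- the B side is s.getLast - s.head
  rw [PySem.List.pyGetD_neg_one (h := hs), PySem.List.pyGetD_zero, head_eq_getD_zero s hs]
  -- the A side via the loop lemma
  have hn : 1 ≤ numbers.length := by
    cases numbers with
    | nil => exact absurd rfl hpre
    | cons a t => simp
  have hsize : ((numbers.length : Int) - 1 + 1).toNat = (numbers.length - 1) + 1 := by omega
  have hidx : PySem.List.pyGetD numbers ((numbers.length : Int) - 1) 0 = numbers.getLast hpre := by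
    rw [PySem.List.pyGetD_eq_getElem _ _ (by omega) (by push_cast; omega),
      List.getLast_eq_getElem]
    congr 1
    omega
  rw [hsize, hidx, roznicaLoop_spec numbers hpre (numbers.length - 1) (by omega)]
  have hdl : numbers.take (numbers.length - 1) = numbers.dropLast := List.dropLast_eq_take.symm
  rw [hdl]
  have hsplit : numbers.dropLast ++ [numbers.getLast hpre] = numbers := List.dropLast_concat_getLast hpre
  have hmemN : ∀ x, x ∈ numbers ↔ x ∈ numbers.getLast hpre :: numbers.dropLast := by
    intro x
    conv_lhs => rw [← hsplit]
    simp [or_comm]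
  set L := numbers.getLast hpre
  set dl := numbers.dropLast
  -- max part
  have hmax : max (dl.foldr max L) L = s.getLast hs := by
    apply le_antisymm
    · have hmem1 : dl.foldr max L ∈ numbers := (hmemN _).mpr (foldr_max_mem L dl)
      have hmem2 : L ∈ numbers := (hmemN _).mpr (by simp)
      have hub := le_getLast_of_pairwise s hs hpair
      exact max_le (hub _ ((hmem _).mpr hmem1)) (hub _ ((hmem _).mpr hmem2))
    · have h1 : s.getLast hs ∈ numbers := (hmem _).mp (List.getLast_mem hs)
      have h2 : s.getLast hs ∈ L :: dl := (hmemN _).mp h1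
      exact le_trans (le_foldr_max L dl _ h2) (le_max_left _ _)
  -- min part
  have hmin : min (dl.foldr min L) L = s.head hs := by
    have hlb : ∀ y ∈ numbers, s.head hs ≤ y := by
      obtain ⟨m, t, hhead⟩ := List.exists_cons_of_ne_nil hs
      have hk := PySem.List.key_head_sorted_le (xs := numbers) (key := fun x => x)
        (by rw [← hs_def]; exact hhead)
      intro y hy
      have hm : s.head hs = m := by simp [hhead]
      rw [hm]; exact hk y hy
    apply le_antisymm
    · have h1 : s.head hs ∈ numbers := (hmem _).mp (List.head_mem hs)
      have h2 : s.head hs ∈ L :: dl := (hmemN _).mp h1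
      exact le_trans (min_le_left _ _) (foldr_min_le L dl _ h2)
    · have hmem1 : dl.foldr min L ∈ numbers := (hmemN _).mpr (foldr_min_mem L dl)
      have hmem2 : L ∈ numbers := (hmemN _).mpr (by simp)
      exact le_min (hlb _ hmem1) (hlb _ hmem2)
  rw [hmax, hmin]
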